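-- pv_equiv track=rewrite | github.com/kmsepr/YouTube | restream.py | parse_extinf
-- ===== SOURCE A (Python) =====
-- def parse_extinf(line: str):
--     if "," in line:
--         left, title = line.split(",", 1)
--     else:
--         left, title = line, ""
--
--     attrs = {}
--     pos = 0
--     while True:
--         eq = left.find("=", pos)
--         if eq == -1:
--             break
--         key_end = eq
--         key_start = left.rfind(" ", 0, key_end)
--         colon = left.rfind(":", 0, key_end)
--         if colon > key_start:
--             key_start = colon
--         key = left[key_start + 1:key_end].strip()
--
--         if eq + 1 < len(left) and left[eq + 1] == '"':
--             val_start = eq + 2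
--             val_end = left.find('"', val_start)
--             if val_end == -1:
--                 break
--             val = left[val_start:val_end]
--             pos = val_end + 1
--         else:
--             val_end = left.find(" ", eq + 1)
--             if val_end == -1:
--                 val_end = len(left)
--             val = left[eq + 1:val_end].strip()
--             pos = val_end
--
--         attrs[key] = val
--     return attrs, title.strip()
-- ===== SOURCE B (Python) =====
-- def parse_extinf(line: str):
--     if "," in line:
--         left, title = line.split(",", 1)
--     else:
--         left, title = line, ""
--
--     # Single forward pass: keep the index of the last ' ' or ':' seen so far
--     # instead of re-scanning the prefix with rfind at every '='.
--     attrs = {}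
--     last_sep = -1
--     i = 0
--     n = len(left)
--     while i < n:
--         c = left[i]
--         if c == ' ' or c == ':':
--             last_sep = i
--             i += 1
--         elif c == '=':
--             key = left[last_sep + 1:i].strip()
--             if i + 1 < n and left[i + 1] == '"':
--                 j = i + 2
--                 while j < n and left[j] != '"':
--                     if left[j] == ' ' or left[j] == ':':
--                         last_sep = j
--                     j += 1
--                 if j == n:
--                     break  # unterminated quote
--                 attrs[key] = left[i + 2:j]
--                 i = j + 1
--             else:
--                 j = i + 1
--                 while j < n and left[j] != ' ':
--                     if left[j] == ':':
--                         last_sep = j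
--                     j += 1
--                 attrs[key] = left[i + 1:j].strip()
--                 i = j
--         else:
--             i += 1
--     return attrs, title.strip()
-- ===== Notes on version B (the rewrite author's own statement) =====
-- stated objective: alternative
-- what changed: A locates each attribute with find and then rfind-scans the whole prefix backwards for the key boundary; B makes a single left-to-right pass over the characters, carrying the index of the most recent separator, so no backward prefix re-scan happens.
import Mathlib
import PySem

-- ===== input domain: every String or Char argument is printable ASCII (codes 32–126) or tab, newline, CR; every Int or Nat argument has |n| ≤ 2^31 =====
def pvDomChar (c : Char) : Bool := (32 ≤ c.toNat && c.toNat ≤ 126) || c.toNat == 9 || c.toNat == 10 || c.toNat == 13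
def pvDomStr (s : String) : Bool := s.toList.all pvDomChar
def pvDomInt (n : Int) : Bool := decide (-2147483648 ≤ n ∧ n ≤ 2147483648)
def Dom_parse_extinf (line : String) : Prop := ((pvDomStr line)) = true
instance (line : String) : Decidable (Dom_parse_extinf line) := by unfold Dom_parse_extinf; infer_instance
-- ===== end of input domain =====

-- B replaces A's repeated find/rfind prefix re-scans with one left-to-right pass that
-- carries the index of the most recent separator seen (objective: alternative single-pass scan).

-- ===== PORT A =====
-- A's `while True` loop; `pos` strictly increases each iteration and stays ≤ len(left),
-- so fuel = len(left)+1 only totalizes the loop and is never exhausted.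
def pvALoop (l : List Char) : Nat → Int → PySem.Dict String String → PySem.Dict String String
  | 0, _, d => d
  | fuel + 1, pos, d =>
    let eq := PySem.Chars.findFrom l ['='] pos none          -- left.find("=", pos)
    if eq = -1 then d
    else
      let key_end := eq
      let key_start := PySem.Chars.rfindFrom l [' '] 0 (some key_end)   -- left.rfind(" ", 0, key_end)
      let colon := PySem.Chars.rfindFrom l [':'] 0 (some key_end)       -- left.rfind(":", 0, key_end)
      let key_start := if key_start < colon then colon else key_start   -- if colon > key_start
      let key := String.ofList (PySem.Chars.strip (PySem.List.slice l (some (key_start + 1)) (some key_end)))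
      if (eq + 1 < (l.length : Int)) ∧ PySem.List.pyGet? l (eq + 1) = some '"' then
        let val_start := eq + 2
        let val_end := PySem.Chars.findFrom l ['"'] val_start none      -- left.find('"', val_start)
        if val_end = -1 then d
        else
          pvALoop l fuel (val_end + 1)
            (d.insert key (String.ofList (PySem.List.slice l (some val_start) (some val_end))))
      else
        let val_end := PySem.Chars.findFrom l [' '] (eq + 1) none       -- left.find(" ", eq + 1)
        let val_end := if val_end = -1 then (l.length : Int) else val_end
        pvALoop l fuel val_end
          (d.insert key (String.ofList (PySem.Chars.strip (PySem.List.slice l (some (eq + 1)) (some val_end)))))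

def parse_extinf (line : String) : (List (String × String)) × String :=
  let cs := line.toList
  -- left, title = line.split(",", 1) if "," in line else (line, "")
  let lt :=
    if PySem.Chars.isIn [','] cs then
      match PySem.Chars.splitOnMax cs [','] 1 with
      | a :: b :: _ => (a, b)
      | _ => (cs, ([] : List Char))   -- unreachable: maxsplit-1 split on a present separator has 2 parts
    else (cs, ([] : List Char))
  let left := lt.1
  let title := lt.2
  ((pvALoop left (left.length + 1) 0 PySem.Dict.empty).items,
   String.ofList (PySem.Chars.strip title))

-- ===== PORT B =====
-- Source B's inner `while j < n and left[j] != '\"'` loop (none = reached end: unterminated quote).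
-- fuel = l.length suffices (j strictly increases), it only totalizes the loop.
def pvBScanQuote (l : List Char) : Nat → Nat → Int → Option (Nat × Int)
  | 0, _, _ => none
  | fuel + 1, j, lsep =>
    if h : j < l.length then
      if l[j] = '"' then some (j, lsep)
      else pvBScanQuote l fuel (j + 1) (if l[j] = ' ' ∨ l[j] = ':' then (j : Int) else lsep)
    else none

-- Source B's inner `while j < n and left[j] != ' '` loop
def pvBScanUnquoted (l : List Char) : Nat → Nat → Int → Nat × Int
  | 0, _, lsep => (l.length, lsep)
  | fuel + 1, j, lsep =>
    if h : j < l.length then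
      if l[j] = ' ' then (j, lsep)
      else pvBScanUnquoted l fuel (j + 1) (if l[j] = ':' then (j : Int) else lsep)
    else (l.length, lsep)

-- Source B's main `while i < n` loop; i strictly increases, so fuel = l.length + 1 only totalizes it
def pvBLoop (l : List Char) : Nat → Nat → Int → PySem.Dict String String → PySem.Dict String String
  | 0, _, _, d => d
  | fuel + 1, i, lsep, d =>
    if h : i < l.length then
      if l[i] = ' ' ∨ l[i] = ':' then pvBLoop l fuel (i + 1) i d
      else if l[i] = '=' then
        let key := String.ofList (PySem.Chars.strip (PySem.List.slice l (some (lsep + 1)) (some (i : Int))))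
        if (i + 1 < l.length) ∧ l[i + 1]? = some '"' then
          match pvBScanQuote l l.length (i + 2) lsep with
          | none => d
          | some (e, lsep') =>
            pvBLoop l fuel (e + 1) lsep'
              (d.insert key (String.ofList (PySem.List.slice l (some ((i : Int) + 2)) (some (e : Int)))))
        else
          let r := pvBScanUnquoted l l.length (i + 1) lsep
          pvBLoop l fuel r.1 r.2
            (d.insert key (String.ofList (PySem.Chars.strip (PySem.List.slice l (some ((i : Int) + 1)) (some (r.1 : Int))))))
      else pvBLoop l fuel (i + 1) lsep d
    else d

def parse_extinf_alt (line : String) : (List (String × String)) × String :=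
  let cs := line.toList
  let lt :=
    if PySem.Chars.isIn [','] cs then
      match PySem.Chars.splitOnMax cs [','] 1 with
      | a :: b :: _ => (a, b)
      | [_] => (cs, ([] : List Char))   -- unreachable: maxsplit-1 split on a present separator has 2 parts
      | [] => (cs, ([] : List Char))
    else (cs, ([] : List Char))
  let left := lt.1
  let title := lt.2
  ((pvBLoop left (left.length + 1) 0 (-1) PySem.Dict.empty).items,
   String.ofList (PySem.Chars.strip title))

-- ===== PRECONDITION & SPEC =====
def Spec_parse_extinf (line : String) (out : (List (String × String)) × String) : Prop := out = parse_extinf_alt line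
instance (line : String) (out : (List (String × String)) × String) : Decidable (Spec_parse_extinf line out) := by unfold Spec_parse_extinf; infer_instance

-- ===== CLAIM (what is proved, stated in full; the proofs are below) =====
def Claim_equal_parse_extinf : Prop := ∀ (line : String), Dom_parse_extinf line → Spec_parse_extinf line (parse_extinf line)

-- ===== LEMMAS AND PROOFS =====

def pvFnd (c : Char) : List Char → Option Nat
  | [] => none
  | x :: xs => if x = c then some 0 else (pvFnd c xs).map (· + 1)
def pvRFnd (c : Char) : List Char → Option Nat
  | [] => none
  | x :: xs =>
    match pvRFnd c xs with
    | some k => some (k + 1)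
    | none => if x = c then some 0 else none
def pvIntOf : Option Nat → Int
  | none => -1
  | some v => v
def pvFndFrom (l : List Char) (c : Char) (j : Nat) : Option Nat :=
  (pvFnd c (l.drop j)).map (· + j)

theorem pvFnd_go (c : Char) (xs : List Char) (k : Nat) :
    PySem.Chars.find.go [c] xs k =
      match pvFnd c xs with
      | none => -1
      | some v => ((k + v : Nat) : Int) := by
  induction xs generalizing k with
  | nil => simp [PySem.Chars.find.go, pvFnd]
  | cons x xs ih =>
    rw [PySem.Chars.find.go]
    by_cases hx : x = c
    · subst hx; simp [pvFnd, List.isPrefixOf]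
    · simp only [pvFnd, if_neg hx]
      have hp : [c].isPrefixOf (x :: xs) = false := by
        simp [List.isPrefixOf]
        intro h; exact absurd h.symm hx
      rw [hp]
      simp only [ih]
      cases pvFnd c xs <;> simp <;> push_cast <;> ring

theorem pvFind_eq (c : Char) (xs : List Char) :
    PySem.Chars.find xs [c] = pvIntOf (pvFnd c xs) := by
  unfold PySem.Chars.find
  rw [pvFnd_go]
  cases pvFnd c xs <;> simp [pvIntOf]

theorem pvFindFrom_eq (l : List Char) (c : Char) (j : Nat) (hj : j ≤ l.length) :
    PySem.Chars.findFrom l [c] (j : Int) none = pvIntOf (pvFndFrom l c j) := by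
  simp only [PySem.Chars.findFrom, pvFndFrom]
  split_ifs with h1 h2 h3 h4 h5 h6 h7 <;>
    simp_all [pvFind_eq, pvIntOf] <;>
    (try cases hf : pvFnd c (l.drop ((j:Int).toNat) ) <;> simp_all [pvIntOf]) <;> omega

theorem pvRFnd_append (c : Char) (xs : List Char) (x : Char) :
    pvRFnd c (xs ++ [x]) = if x = c then some xs.length else pvRFnd c xs := by
  induction xs with
  | nil => cases hx : decide (x = c) <;> simp_all [pvRFnd]
  | cons y ys ih =>
    simp only [List.cons_append, pvRFnd, ih]
    by_cases hx : x = c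
    · simp [hx]
    · simp [hx]

theorem pvRFnd_go (xs : List Char) (c : Char) (m : Nat) :
    PySem.Chars.rfind.go xs [c] m = pvIntOf (pvRFnd c (xs.take (m + 1))) := by
  induction m with
  | zero =>
    rw [PySem.Chars.rfind.go]
    cases xs with
    | nil => simp [pvRFnd, pvIntOf, List.isPrefixOf]
    | cons y ys =>
      by_cases hy : y = c
      · simp [List.isPrefixOf, hy, pvRFnd, pvIntOf]
      · have hp : [c].isPrefixOf (y :: ys) = false := by
          simp [List.isPrefixOf]; intro h; exact absurd h.symm hy
        simp [hp, pvRFnd, pvIntOf, hy]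
  | succ m ih =>
    rw [PySem.Chars.rfind.go, ih]
    by_cases hm : m + 1 < xs.length
    · have hdrop : xs.drop (m + 1) = xs[m + 1] :: xs.drop (m + 2) := by
        exact (List.drop_eq_getElem_cons hm)
      have htake : xs.take (m + 2) = xs.take (m + 1) ++ [xs[m + 1]] := by
        exact List.take_succ_eq_append_getElem hm
      rw [htake, pvRFnd_append]
      by_cases hx : xs[m + 1] = c
      · have hp : [c].isPrefixOf (xs.drop (m + 1)) = true := by
          rw [hdrop]; simp [List.isPrefixOf, hx]
        rw [hp]
        simp [pvIntOf, List.length_take, Nat.min_eq_left (Nat.le_of_lt hm), hx]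
      · have hp : [c].isPrefixOf (xs.drop (m + 1)) = false := by
          rw [hdrop]; simp [List.isPrefixOf]; intro h; exact absurd h.symm hx
        rw [hp]; simp [hx]
    · have hdrop : xs.drop (m + 1) = [] := List.drop_eq_nil_of_le (by omega)
      have htake : xs.take (m + 2) = xs.take (m + 1) := by
        rw [List.take_of_length_le (by omega), List.take_of_length_le (by omega)]
      rw [hdrop, htake]
      simp [List.isPrefixOf]

theorem pvRFind_eq (xs : List Char) (c : Char) :
    PySem.Chars.rfind xs [c] = pvIntOf (pvRFnd c xs) := by
  unfold PySem.Chars.rfind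
  rw [pvRFnd_go]
  congr 1
  rw [List.take_of_length_le (by omega)]

theorem pvRFindFrom_eq (l : List Char) (c : Char) (e : Nat) (he : e ≤ l.length) :
    PySem.Chars.rfindFrom l [c] 0 (some (e : Int)) = pvIntOf (pvRFnd c (l.take e)) := by
  simp only [PySem.Chars.rfindFrom]
  split_ifs with h1 h2 h3 h4 h5 h6 h7 <;>
    simp_all [pvRFind_eq] <;>
    (try cases hf : pvRFnd c (l.take e) <;> simp_all [pvIntOf]) <;> omega

def pvSepIdx (l : List Char) : Nat → Int
  | 0 => -1
  | i + 1 =>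
    match l[i]? with
    | some c => if c = ' ' ∨ c = ':' then (i : Int) else pvSepIdx l i
    | none => pvSepIdx l i

theorem pvIntOf_some (v : Nat) : pvIntOf (some v) = (v : Int) := rfl

theorem pvRFnd_lt (c : Char) (xs : List Char) : pvIntOf (pvRFnd c xs) < (xs.length : Int) := by
  induction xs with
  | nil => simp [pvRFnd, pvIntOf]
  | cons x t ih =>
    simp only [pvRFnd, List.length_cons]
    cases h : pvRFnd c t with
    | some k => rw [h] at ih; simp [pvIntOf] at ih ⊢; omega
    | none =>
      rw [h] at ih
      by_cases hx : x = c <;> simp [hx, pvIntOf] at ih ⊢ <;> try omega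

theorem pvSepIdx_succ (l : List Char) (i : Nat) (h : i < l.length) :
    pvSepIdx l (i + 1) = if l[i] = ' ' ∨ l[i] = ':' then (i : Int) else pvSepIdx l i := by
  rw [pvSepIdx, List.getElem?_eq_getElem h]

theorem pvSepIdx_max (l : List Char) (m : Nat) (hm : m ≤ l.length) :
    (if pvIntOf (pvRFnd ' ' (l.take m)) < pvIntOf (pvRFnd ':' (l.take m))
     then pvIntOf (pvRFnd ':' (l.take m)) else pvIntOf (pvRFnd ' ' (l.take m))) =
    pvSepIdx l m := by
  induction m with
  | zero => simp [pvRFnd, pvIntOf, pvSepIdx]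
  | succ m ih =>
    have hm' : m < l.length := by omega
    have htake : l.take (m + 1) = l.take m ++ [l[m]] := List.take_succ_eq_append_getElem hm'
    have hlen : (l.take m).length = m := by simp [Nat.min_eq_left (Nat.le_of_lt hm')]
    have hbs : pvIntOf (pvRFnd ' ' (l.take m)) < (m : Int) := by
      have := pvRFnd_lt ' ' (l.take m); rwa [hlen] at this
    have hbc : pvIntOf (pvRFnd ':' (l.take m)) < (m : Int) := by
      have := pvRFnd_lt ':' (l.take m); rwa [hlen] at this
    rw [pvSepIdx_succ l m hm', htake, pvRFnd_append, pvRFnd_append]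
    by_cases hsp : l[m] = ' '
    · have hco : ¬ l[m] = ':' := by rw [hsp]; decide
      rw [if_pos hsp, if_neg hco, hlen]
      rw [if_neg (by rw [pvIntOf_some]; omega), pvIntOf_some, if_pos (Or.inl hsp)]
    · by_cases hco : l[m] = ':'
      · rw [if_neg hsp, if_pos hco, hlen]
        rw [if_pos (by rw [pvIntOf_some]; omega), pvIntOf_some, if_pos (Or.inr hco)]
      · rw [if_neg hsp, if_neg hco, ih (by omega), if_neg (by simp [hsp, hco])]

theorem pvFndFrom_end (l : List Char) (c : Char) (j : Nat) (h : l.length ≤ j) :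
    pvFndFrom l c j = none := by
  simp [pvFndFrom, List.drop_eq_nil_of_le h, pvFnd]

theorem pvFndFrom_hit (l : List Char) (c : Char) (j : Nat) (h : j < l.length) (hc : l[j]? = some c) :
    pvFndFrom l c j = some j := by
  have hdrop : l.drop j = l[j] :: l.drop (j + 1) := List.drop_eq_getElem_cons h
  rw [List.getElem?_eq_getElem h, Option.some_inj] at hc
  simp [pvFndFrom, hdrop, pvFnd, hc]

theorem pvFndFrom_miss (l : List Char) (c : Char) (j : Nat) (h : j < l.length) (hc : ¬ l[j]? = some c) :
    pvFndFrom l c j = pvFndFrom l c (j + 1) := by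
  have hdrop : l.drop j = l[j] :: l.drop (j + 1) := List.drop_eq_getElem_cons h
  rw [List.getElem?_eq_getElem h] at hc
  have hne : ¬ l[j] = c := by intro hx; exact hc (by rw [hx])
  simp only [pvFndFrom, hdrop, pvFnd, if_neg hne]
  cases pvFnd c (l.drop (j + 1)) <;> simp <;> omega

theorem pvFnd_some_lt (c : Char) (xs : List Char) (v : Nat) (h : pvFnd c xs = some v) :
    v < xs.length ∧ xs[v]? = some c := by
  induction xs generalizing v with
  | nil => simp [pvFnd] at h
  | cons x t ih =>
    by_cases hx : x = c
    · simp [pvFnd, hx] at h; subst h; simp [hx]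
    · simp only [pvFnd, if_neg hx, Option.map_eq_some_iff] at h
      obtain ⟨w, hw, rfl⟩ := h
      obtain ⟨h1, h2⟩ := ih w hw
      exact ⟨by simpa using h1, by simpa using h2⟩

theorem pvFndFrom_some (l : List Char) (c : Char) (j v : Nat) (h : pvFndFrom l c j = some v) :
    j ≤ v ∧ v < l.length ∧ l[v]? = some c := by
  simp only [pvFndFrom, Option.map_eq_some_iff] at h
  obtain ⟨w, hw, rfl⟩ := h
  obtain ⟨h1, h2⟩ := pvFnd_some_lt c _ w hw
  refine ⟨by omega, by simp at h1 ⊢; omega, ?_⟩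
  rw [List.getElem?_drop] at h2
  rwa [Nat.add_comm] at h2

-- A's loop ignores a position whose character is not '='
theorem pvALoop_skip (l : List Char) (fuel : Nat) (i : Nat) (d : PySem.Dict String String)
    (h : i < l.length) (hne : ¬ l[i] = '=') :
    pvALoop l fuel (i : Int) d = pvALoop l fuel (((i + 1 : Nat)) : Int) d := by
  cases fuel with
  | zero => rfl
  | succ fuel =>
    simp only [pvALoop]
    rw [pvFindFrom_eq l '=' i (by omega), pvFindFrom_eq l '=' (i + 1) (by omega),
        pvFndFrom_miss l '=' i h (by
          intro hc; rw [List.getElem?_eq_getElem h] at hc; exact hne (Option.some_inj.mp hc))]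

theorem pvBScanQuote_eq (l : List Char) (sfuel : Nat) :
    ∀ j : Nat, j ≤ l.length → l.length - j < sfuel →
      pvBScanQuote l sfuel j (pvSepIdx l j) =
        (pvFndFrom l '"' j).map (fun v => (v, pvSepIdx l v)) := by
  induction sfuel with
  | zero => intro j hj hf; omega
  | succ sfuel ih =>
    intro j hj hf
    simp only [pvBScanQuote]
    by_cases h : j < l.length
    · rw [dif_pos h]
      by_cases hq : l[j] = '"'
      · rw [if_pos hq, pvFndFrom_hit l '"' j h (by rw [List.getElem?_eq_getElem h, hq])]
        rfl
      · have hne : ¬ l[j]? = some '"' := by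
          rw [List.getElem?_eq_getElem h]
          intro hc; exact hq (Option.some_inj.mp hc)
        rw [if_neg hq, pvFndFrom_miss l '"' j h hne]
        have harg : (if l[j] = ' ' ∨ l[j] = ':' then ((j : Int)) else pvSepIdx l j) = pvSepIdx l (j + 1) :=
          (pvSepIdx_succ l j h).symm
        rw [harg]
        exact ih (j + 1) (by omega) (by omega)
    · rw [dif_neg h, pvFndFrom_end l '"' j (by omega)]
      rfl

theorem pvBScanUnquoted_eq (l : List Char) (sfuel : Nat) :
    ∀ j : Nat, j ≤ l.length → l.length - j < sfuel →
      pvBScanUnquoted l sfuel j (pvSepIdx l j) =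
        ((pvFndFrom l ' ' j).getD l.length, pvSepIdx l ((pvFndFrom l ' ' j).getD l.length)) := by
  induction sfuel with
  | zero => intro j hj hf; omega
  | succ sfuel ih =>
    intro j hj hf
    simp only [pvBScanUnquoted]
    by_cases h : j < l.length
    · rw [dif_pos h]
      by_cases hq : l[j] = ' '
      · rw [if_pos hq, pvFndFrom_hit l ' ' j h (by rw [List.getElem?_eq_getElem h, hq])]
        rfl
      · have hne : ¬ l[j]? = some ' ' := by
          rw [List.getElem?_eq_getElem h]
          intro hc; exact hq (Option.some_inj.mp hc)
        rw [if_neg hq, pvFndFrom_miss l ' ' j h hne]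
        have harg : (if l[j] = ':' then ((j : Int)) else pvSepIdx l j) = pvSepIdx l (j + 1) := by
          rw [pvSepIdx_succ l j h]
          by_cases hc : l[j] = ':'
          · rw [if_pos hc, if_pos (Or.inr hc)]
          · rw [if_neg hc, if_neg (by rintro (h1 | h2) <;> [exact hq h1; exact hc h2])]
        rw [harg]
        exact ih (j + 1) (by omega) (by omega)
    · rw [dif_neg h]
      have hje : j = l.length := by omega
      subst hje
      rw [pvFndFrom_end l ' ' l.length (Nat.le_refl _)]
      rfl

-- main correspondence: A's loop at pos i equals B's loop at i with the running separator index
theorem pvLoop_eq (l : List Char) :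
    ∀ (fuelB fuelA : Nat) (i : Nat) (d : PySem.Dict String String),
      i ≤ l.length → l.length - i < fuelA → l.length - i < fuelB →
      pvALoop l fuelA (i : Int) d = pvBLoop l fuelB i (pvSepIdx l i) d := by
  intro fuelB
  induction fuelB with
  | zero => intro fuelA i d hi hfA hfB; omega
  | succ fuelB ih =>
    intro fuelA i d hi hfA hfB
    by_cases h : i < l.length
    · by_cases hsep : l[i] = ' ' ∨ l[i] = ':'
      · simp only [pvBLoop]
        rw [dif_pos h, if_pos hsep]
        rw [pvALoop_skip l fuelA i d h (by
          rcases hsep with h1 | h1 <;> rw [h1] <;> decide)]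
        have hs : ((i : Nat) : Int) = pvSepIdx l (i + 1) := by
          rw [pvSepIdx_succ l i h, if_pos hsep]
        rw [hs]
        exact ih fuelA (i + 1) d (by omega) (by omega) (by omega)
      · by_cases heq : l[i] = '='
        · cases fuelA with
          | zero => omega
          | succ fuelA =>
            simp only [pvALoop, pvBLoop]
            rw [dif_pos h, if_neg hsep, if_pos heq]
            rw [pvFindFrom_eq l '=' i (by omega),
                pvFndFrom_hit l '=' i h (by rw [List.getElem?_eq_getElem h, heq]),
                pvIntOf_some, if_neg (by omega : ¬ ((i : Int) = -1))]
            rw [pvRFindFrom_eq l ' ' i (by omega), pvRFindFrom_eq l ':' i (by omega)]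
            rw [pvSepIdx_max l i (by omega)]
            have hcast1 : ((i : Int) + 1) = (((i + 1 : Nat)) : Int) := by push_cast; ring
            rw [hcast1, PySem.List.pyGet?_natCast l (i + 1)]
            by_cases hg : i + 1 < l.length ∧ l[i + 1]? = some '"'
            · -- quoted value
              rw [if_pos hg]
              rw [if_pos (⟨by exact_mod_cast hg.1, hg.2⟩ :
                    ((i + 1 : Nat) : Int) < (l.length : Int) ∧ l[i + 1]? = some '"')]
              have hq1 : l[i + 1] = '"' := by
                have := hg.2; rw [List.getElem?_eq_getElem hg.1] at this
                exact Option.some_inj.mp this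
              have hcast2 : ((i : Int) + 2) = (((i + 2 : Nat)) : Int) := by push_cast; ring
              rw [hcast2, pvFindFrom_eq l '"' (i + 2) (by omega)]
              have hs2 : pvSepIdx l i = pvSepIdx l (i + 2) := by
                rw [pvSepIdx_succ l (i + 1) hg.1, if_neg (by rw [hq1]; decide),
                    pvSepIdx_succ l i h, if_neg hsep]
              rw [hs2, pvBScanQuote_eq l l.length (i + 2) (by omega) (by omega)]
              cases hv : pvFndFrom l '"' (i + 2) with
              | none =>
                rw [if_pos (show pvIntOf none = (-1 : Int) from rfl)]
                rfl
              | some v =>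
                obtain ⟨hv1, hv2, hv3⟩ := pvFndFrom_some l '"' (i + 2) v hv
                have hqv : l[v] = '"' := by
                  rw [List.getElem?_eq_getElem hv2] at hv3; exact Option.some_inj.mp hv3
                rw [pvIntOf_some, if_neg (by omega : ¬ ((v : Int) = -1))]
                have hcast3 : ((v : Int) + 1) = (((v + 1 : Nat)) : Int) := by push_cast; ring
                rw [hcast3, ih fuelA (v + 1) _ (by omega) (by omega) (by omega)]
                have hs3 : pvSepIdx l (v + 1) = pvSepIdx l v := by
                  rw [pvSepIdx_succ l v hv2, if_neg (by rw [hqv]; decide)]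
                rw [hs3]
                rfl
            · -- unquoted value
              rw [if_neg hg]
              rw [if_neg (fun hq => hg ⟨by exact_mod_cast hq.1, hq.2⟩ :
                    ¬ (((i + 1 : Nat) : Int) < (l.length : Int) ∧ l[i + 1]? = some '"'))]
              rw [pvFindFrom_eq l ' ' (i + 1) (by omega)]
              have hs1 : pvSepIdx l i = pvSepIdx l (i + 1) := by
                rw [pvSepIdx_succ l i h, if_neg hsep]
              rw [hs1, pvBScanUnquoted_eq l l.length (i + 1) (by omega) (by omega)]
              cases hv : pvFndFrom l ' ' (i + 1) with
              | none =>
                rw [if_pos (show pvIntOf none = (-1 : Int) from rfl)]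
                rw [ih fuelA l.length _ (Nat.le_refl _) (by omega) (by omega)]
                rfl
              | some v =>
                obtain ⟨hv1, hv2, hv3⟩ := pvFndFrom_some l ' ' (i + 1) v hv
                rw [pvIntOf_some, if_neg (by omega : ¬ ((v : Int) = -1))]
                rw [ih fuelA v _ (by omega) (by omega) (by omega)]
                rfl
        · simp only [pvBLoop]
          rw [dif_pos h, if_neg hsep, if_neg heq]
          rw [pvALoop_skip l fuelA i d h heq]
          have hs : pvSepIdx l i = pvSepIdx l (i + 1) := by
            rw [pvSepIdx_succ l i h, if_neg hsep]
          rw [hs]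
          exact ih fuelA (i + 1) d (by omega) (by omega) (by omega)
    · have hin : i = l.length := by omega
      subst hin
      cases fuelA with
      | zero => omega
      | succ fuelA =>
        simp only [pvALoop, pvBLoop]
        rw [pvFindFrom_eq l '=' l.length (Nat.le_refl _),
            pvFndFrom_end l '=' l.length (Nat.le_refl _),
            if_pos (show pvIntOf none = (-1 : Int) from rfl), dif_neg (lt_irrefl _)]

theorem pvLoop_eq_zero (l : List Char) (d : PySem.Dict String String) :
    pvALoop l (l.length + 1) 0 d = pvBLoop l (l.length + 1) 0 (-1) d := by
  have := pvLoop_eq l (l.length + 1) (l.length + 1) 0 d (Nat.zero_le _) (by omega) (by omega)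
  simpa [pvSepIdx] using this

-- ===== VERDICT (by name: the statement is the Claim_ definition above) =====
theorem parse_extinf_spec : Claim_equal_parse_extinf := by
  intro line _
  unfold Spec_parse_extinf parse_extinf parse_extinf_alt
  by_cases hc : PySem.Chars.isIn [','] line.toList
  · simp only [if_pos hc]
    cases hsp : PySem.Chars.splitOnMax line.toList [','] 1 with
    | nil => simp only [pvLoop_eq_zero]
    | cons a rest =>
      cases rest with
      | nil => simp only [pvLoop_eq_zero]
      | cons b r => simp only [pvLoop_eq_zero]
  · simp only [if_neg hc, pvLoop_eq_zero]
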